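-- pv_equiv track=rewrite | github.com/Jimmy4carter/ACRONYMS | mnemonics.py | generate_mnemonic
-- ===== SOURCE A (Python) =====
-- def generate_mnemonic(text):
--     elements = text.split()
--     mnemonic = ""
--
--     for i, word in enumerate(elements):
--         first_letter = word[0].upper()
--         mnemonic += first_letter
--
--     mnemonic_sentence = " ".join(mnemonic[i:i+4] for i in range(0, len(mnemonic), 4))
--
--     return mnemonic_sentence
-- ===== SOURCE B (Python) =====
-- def generate_mnemonic(text):
--     parts = []
--     count = 0
--     for word in text.split():
--         if count and count % 4 == 0:
--             parts.append(" ")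
--         parts.append(word[0].upper())
--         count += 1
--     return "".join(parts)
-- ===== Notes on version B (the rewrite author's own statement) =====
-- stated objective: simpler
-- what changed: Single fused pass over the words that emits each uppercased initial directly, inserting a space whenever the running letter count is a positive multiple of 4, instead of first building the full initials string and then re-scanning it with a range/slice chunking join.
import Mathlib
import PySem

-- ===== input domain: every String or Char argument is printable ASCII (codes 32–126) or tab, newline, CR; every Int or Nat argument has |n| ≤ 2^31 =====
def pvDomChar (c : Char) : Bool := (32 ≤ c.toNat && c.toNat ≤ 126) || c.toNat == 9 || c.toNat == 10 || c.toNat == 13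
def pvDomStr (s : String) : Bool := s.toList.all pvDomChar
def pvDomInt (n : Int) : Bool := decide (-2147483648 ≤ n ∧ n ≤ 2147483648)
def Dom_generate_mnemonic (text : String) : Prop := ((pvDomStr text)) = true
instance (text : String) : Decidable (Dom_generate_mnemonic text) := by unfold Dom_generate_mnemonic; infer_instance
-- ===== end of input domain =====

-- B replaces A's two-phase build-then-chunk (initials string, then a range/slice join) by one
-- fused pass over the words with a running letter count; objective: simpler, same O(n) cost.

-- ===== PORT A =====
-- Python A: split; loop appending word[0].upper(); then " ".join(mnemonic[i:i+4] for i in range(0, len, 4)).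
-- word[0] never raises on split() output (words are nonempty), so the `none` branch is unreachable;
-- upperChar is exact for .upper() on a one-character ASCII string.
def generate_mnemonic (text : String) : String :=
  let elements := PySem.Str.split₀ text
  -- 'for i, word in enumerate(elements)': the index i is unused, so the fold runs over the words
  let mnemonic : List Char := elements.foldl (fun m w =>
    match PySem.Str.pyGet? w 0 with
    | some c => m ++ [PySem.Chars.upperChar c]
    | none => m) []
  String.mk (PySem.Chars.join [' ']
    ((PySem.List.pyRange 0 (mnemonic.length : Int) 4).map
      (fun i => PySem.List.slice mnemonic (some i) (some (i + 4)))))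

-- ===== PORT B =====
-- Python B: one loop over the words; state = (emitted chars, count); space before a letter when
-- count is a positive multiple of 4.  The `none` branch (empty word) is unreachable on split() output.
def generate_mnemonic_alt (text : String) : String :=
  String.mk ((PySem.Str.split₀ text).foldl (fun st w =>
    match PySem.Str.pyGet? w 0 with
    | some c =>
        ((if st.2 ≠ 0 ∧ st.2 % 4 = 0 then st.1 ++ [' '] else st.1) ++ [PySem.Chars.upperChar c],
         st.2 + 1)
    | none => st) (([] : List Char), (0 : Nat))).1

-- ===== PRECONDITION & SPEC =====
def Spec_generate_mnemonic (text : String) (out : String) : Prop := out = generate_mnemonic_alt text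
instance (text : String) (out : String) : Decidable (Spec_generate_mnemonic text out) := by unfold Spec_generate_mnemonic; infer_instance

-- ===== CLAIM (what is proved, stated in full; the proofs are below) =====
def Claim_equal_generate_mnemonic : Prop := ∀ (text : String), Dom_generate_mnemonic text → Spec_generate_mnemonic text (generate_mnemonic text)

-- ===== LEMMAS AND PROOFS =====

-- the (at most one) uppercased initial a word contributes
def pvInitial (w : String) : List Char :=
  match PySem.Str.pyGet? w 0 with
  | some c => [PySem.Chars.upperChar c]
  | none => []

-- A's chunking, as a structural recursion: blocks of 4 characters
def pvChunks (s : List Char) : List (List Char) :=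
  if h : s = [] then [] else s.take 4 :: pvChunks (s.drop 4)
termination_by s.length
decreasing_by
  have hp : 0 < s.length := List.length_pos_iff.mpr h
  simp [List.length_drop]; omega

-- B's fused loop, restated on the list of initials with the running count
def pvFused (acc : List Char) (n : Nat) : List Char → List Char
  | [] => acc
  | c :: cs => pvFused ((if n ≠ 0 ∧ n % 4 = 0 then acc ++ [' '] else acc) ++ [c]) (n + 1) cs

theorem pvFoldA (ws : List String) (m : List Char) :
    ws.foldl (fun m w =>
      match PySem.Str.pyGet? w 0 with
      | some c => m ++ [PySem.Chars.upperChar c]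
      | none => m) m = m ++ ws.flatMap pvInitial := by
  induction ws generalizing m with
  | nil => simp
  | cons w ws ih =>
      cases h : PySem.Str.pyGet? w 0 with
      | none => simp only [List.foldl_cons, List.flatMap_cons, pvInitial, h]; rw [ih]; simp
      | some c => simp only [List.foldl_cons, List.flatMap_cons, pvInitial, h]; rw [ih]; simp

theorem pvFoldB (ws : List String) (acc : List Char) (n : Nat) :
    ws.foldl (fun st w =>
      match PySem.Str.pyGet? w 0 with
      | some c =>
          ((if st.2 ≠ 0 ∧ st.2 % 4 = 0 then st.1 ++ [' '] else st.1) ++ [PySem.Chars.upperChar c],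
           st.2 + 1)
      | none => st) (acc, n)
    = (pvFused acc n (ws.flatMap pvInitial), n + (ws.flatMap pvInitial).length) := by
  induction ws generalizing acc n with
  | nil => simp [pvFused]
  | cons w ws ih =>
      cases h : PySem.Str.pyGet? w 0 with
      | none => simp only [List.foldl_cons, List.flatMap_cons, pvInitial, h]; simpa using ih acc n
      | some c =>
          simp only [List.foldl_cons, List.flatMap_cons, pvInitial, h,
            List.cons_append, List.nil_append, pvFused, List.length_cons]
          rw [ih]
          simp only [Prod.mk.injEq]
          exact ⟨trivial, by omega⟩

theorem pvChunks_map (s : List Char) :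
    (PySem.List.pyRange 0 (s.length : Int) 4).map
      (fun i => PySem.List.slice s (some i) (some (i + 4))) = pvChunks s := by
  generalize hL : s.length = len
  induction len using Nat.strong_induction_on generalizing s with
  | _ len ih =>
  rw [← hL]
  rw [PySem.List.pyRange_of_pos 0 (s.length : Int) (by norm_num), List.map_map]
  by_cases hnil : s = []
  · subst hnil; simp [pvChunks]
  · have hpos : 0 < s.length := List.length_pos_iff.mpr hnil
    have hlt : (0 : Int) < (s.length : Int) := by exact_mod_cast hpos
    rw [if_pos hlt]
    have hcount : ((((s.length : Int)) - 0 + 4 - 1) / 4).toNat = (s.length + 3) / 4 := by omega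
    rw [hcount]
    have hslice : ∀ (t : List Char) (k : Nat),
        PySem.List.slice t (some ((0 : Int) + 4 * (k : Int))) (some ((0 : Int) + 4 * (k : Int) + 4))
          = (t.drop (4 * k)).take 4 := by
      intro t k
      have h1 : ((0 : Int) + 4 * (k : Int)) = ((4 * k : Nat) : Int) := by push_cast; ring
      have h2 : ((0 : Int) + 4 * (k : Int) + 4) = ((4 * k : Nat) : Int) + ((4 : Nat) : Int) := by
        push_cast; ring
      rw [h2, h1, PySem.List.slice_natCast_add]
    have hsucc : (s.length + 3) / 4 = ((s.drop 4).length + 3) / 4 + 1 := by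
      simp only [List.length_drop]; omega
    rw [hsucc, List.range_succ_eq_map, List.map_cons, List.map_map]
    rw [pvChunks]; rw [dif_neg hnil]
    congr 1
    · simpa using hslice s 0
    · have := ih (s.drop 4).length (by simp [List.length_drop]; omega) (s.drop 4) rfl
      rw [PySem.List.pyRange_of_pos 0 ((s.drop 4).length : Int) (by norm_num), List.map_map] at this
      by_cases hd : s.drop 4 = []
      · have : (s.drop 4).length = 0 := by simp [hd]
        have hz : ((s.drop 4).length + 3) / 4 = 0 := by omega
        rw [hz]
        simp [hd, pvChunks]
      · have hdpos : 0 < (s.drop 4).length := List.length_pos_iff.mpr hd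
        have hdlt : (0 : Int) < ((s.drop 4).length : Int) := by exact_mod_cast hdpos
        rw [if_pos hdlt] at this
        have hc2 : (((((s.drop 4).length : Int)) - 0 + 4 - 1) / 4).toNat = ((s.drop 4).length + 3) / 4 := by
          omega
        rw [hc2] at this
        rw [← this]
        apply List.map_congr_left
        intro k _
        simp only [Function.comp]
        rw [hslice s (k + 1), hslice (s.drop 4) k]
        rw [List.drop_drop]
        congr 2
        omega

theorem pvFused_append (t u : List Char) (acc : List Char) (n : Nat) :
    pvFused acc n (t ++ u) = pvFused (pvFused acc n t) (n + t.length) u := by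
  induction t generalizing acc n with
  | nil => simp [pvFused]
  | cons c cs ih => simp [pvFused, ih]; ring_nf

theorem pvFused_block (t : List Char) (acc : List Char) (n : Nat)
    (hn : n % 4 = 0) (h0 : t ≠ []) (h4 : t.length ≤ 4) :
    pvFused acc n t = (if n ≠ 0 then acc ++ [' '] else acc) ++ t := by
  have h1 : (n + 1) % 4 ≠ 0 := by omega
  have h2 : (n + 1 + 1) % 4 ≠ 0 := by omega
  have h3 : (n + 1 + 1 + 1) % 4 ≠ 0 := by omega
  match t with
  | [] => exact absurd rfl h0
  | [a] => simp [pvFused, hn]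
  | [a, b] => simp [pvFused, hn, h1]
  | [a, b, c] => simp [pvFused, hn, h1, h2]
  | [a, b, c, d] => simp [pvFused, hn, h1, h2, h3]
  | a :: b :: c :: d :: e :: rest => simp at h4; omega

theorem pvFused_chunks (s : List Char) (acc : List Char) (n : Nat) (hn : n % 4 = 0) :
    pvFused acc n s
      = acc ++ (if n ≠ 0 ∧ s ≠ [] then [' '] else []) ++ PySem.Chars.join [' '] (pvChunks s) := by
  generalize hL : s.length = len
  induction len using Nat.strong_induction_on generalizing s acc n with
  | _ len ih =>
  by_cases hnil : s = []
  · subst hnil; simp [pvFused, pvChunks]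
  · have hpos : 0 < s.length := List.length_pos_iff.mpr hnil
    have hsplit : s = s.take 4 ++ s.drop 4 := (List.take_append_drop 4 s).symm
    rw [pvChunks, dif_neg hnil]
    by_cases hd : s.drop 4 = []
    · -- short string: a single chunk
      have hle : s.length ≤ 4 := List.drop_eq_nil_iff.mp hd
      have ht : s.take 4 = s := List.take_of_length_le hle
      rw [hd, show pvChunks ([] : List Char) = [] from by rw [pvChunks]; simp,
        PySem.Chars.join_singleton, ht]
      rw [pvFused_block s acc n hn hnil hle]
      by_cases h0 : n = 0 <;> simp [h0, hnil]
    · -- at least two chunks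
      have hlen4 : s.length > 4 := by
        rcases Nat.lt_or_ge 4 s.length with h | h
        · exact h
        · exact absurd (List.drop_eq_nil_iff.mpr h) hd
      have htlen : (s.take 4).length = 4 := by simp; omega
      conv_lhs => rw [hsplit]
      rw [pvFused_append, pvFused_block (s.take 4) acc n hn (by
            intro h; rw [h] at htlen; simp at htlen) (by omega)]
      rw [htlen]
      have hih := ih (s.drop 4).length (by simp [List.length_drop]; omega) (s.drop 4)
          ((if n ≠ 0 then acc ++ [' '] else acc) ++ s.take 4) (n + 4) (by omega) rfl
      rw [hih]
      have hjoin : PySem.Chars.join [' '] (s.take 4 :: pvChunks (s.drop 4))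
          = s.take 4 ++ [' '] ++ PySem.Chars.join [' '] (pvChunks (s.drop 4)) := by
        rw [pvChunks, dif_neg hd, PySem.Chars.join_cons_cons]
      rw [hjoin]
      simp [hd]
      by_cases h0 : n = 0 <;> simp [h0, hnil]

-- ===== VERDICT (by name: the statement is the Claim_ definition above) =====
theorem generate_mnemonic_spec : Claim_equal_generate_mnemonic := by
  intro text _
  unfold Spec_generate_mnemonic generate_mnemonic generate_mnemonic_alt
  simp only
  rw [pvFoldA, pvFoldB]
  simp only [List.nil_append]
  rw [pvChunks_map, pvFused_chunks _ _ _ (by omega)]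
  simp
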